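-- pv_equiv track=rewrite | github.com/xydxydxyd1/alias-recommendation | src/alias_generation.py | generate_alias
-- ===== SOURCE A (Python) =====
-- def generate_alias(command, alias_len=4):
--     """Generate an alias for a command
--
--     alias_len -- the length of the generated alias. If one cannot be generated,
--     command is returned without whitespace.
--     """
--     words = command.split()
--     words = ["".join(filter(str.isalnum, word)) for word in words]
--
--     # List of beginning characters of each word to be used in the alias
--     word_heads = ["" for _ in range(len(words))]
--     current_alias_len = 0
--     out_of_characters = False
--     current_character_index = 0
--     while current_alias_len < alias_len and not out_of_characters:
--         out_of_characters = True
--         for word_index, word in enumerate(words):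
--             if current_character_index < len(word):
--                 out_of_characters = False
--                 word_heads[word_index] += word[current_character_index]
--                 current_alias_len += 1
--         current_character_index += 1
--     return "".join(word_heads)
-- ===== SOURCE B (Python) =====
-- def generate_alias(command, alias_len=4):
--     """Generate an alias for a command
--
--     alias_len -- the length of the generated alias. If one cannot be generated,
--     command is returned without whitespace.
--     """
--     words = ["".join(filter(str.isalnum, word)) for word in command.split()]
--     # Count whole character-columns consumed instead of building per-word heads.
--     cols = 0
--     total = 0
--     while total < alias_len and any(len(w) > cols for w in words):
--         total += sum(1 for w in words if len(w) > cols)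
--         cols += 1
--     return "".join(w[:cols] for w in words)
-- ===== Notes on version B (the rewrite author's own statement) =====
-- stated objective: simpler
-- what changed: B keeps only a column counter and a running total instead of A's per-word string accumulators and out_of_characters flag, and builds the result once at the end by slicing each word to the consumed column count.
import Mathlib
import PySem

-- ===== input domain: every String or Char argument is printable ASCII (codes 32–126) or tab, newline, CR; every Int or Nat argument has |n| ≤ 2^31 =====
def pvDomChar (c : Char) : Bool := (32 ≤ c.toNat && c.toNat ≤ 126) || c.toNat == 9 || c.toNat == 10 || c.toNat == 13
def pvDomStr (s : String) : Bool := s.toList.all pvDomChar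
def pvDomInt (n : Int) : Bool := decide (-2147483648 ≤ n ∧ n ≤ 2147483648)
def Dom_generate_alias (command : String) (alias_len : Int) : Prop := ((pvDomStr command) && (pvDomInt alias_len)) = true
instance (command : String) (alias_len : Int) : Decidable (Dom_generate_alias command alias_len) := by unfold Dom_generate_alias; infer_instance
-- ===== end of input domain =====

-- B replaces A's per-word string accumulators and out_of_characters flag by a single column
-- counter with a running total, slicing each word once at the end (objective: simpler).


-- ===== PORT A =====
-- words = ["".join(filter(str.isalnum, word)) for word in command.split()] (shared preprocessing)
def gaWords (command : String) : List (List Char) :=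
  (PySem.Str.split₀ command).map (fun w => w.toList.filter PySem.Chars.isalnum)

-- the inner `for word_index, word in enumerate(words)` pass: walks word_heads and words in
-- lockstep (they always have the same length), returning
-- (updated word_heads, current_alias_len, out_of_characters)
def gaInner (idx : Nat) : List (List Char) → List (List Char) → Int → Bool →
    List (List Char) × Int × Bool
  | h :: hs, w :: ws, cal, ooc =>
    if hlt : idx < w.length then
      let r := gaInner idx hs ws (cal + 1) false
      ((h ++ [w.get ⟨idx, hlt⟩]) :: r.1, r.2.1, r.2.2)
    else
      let r := gaInner idx hs ws cal ooc
      (h :: r.1, r.2.1, r.2.2)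
  | hs, _, cal, ooc => (hs, cal, ooc)

-- the while loop; fuel only makes the recursion structural (the loop exits by itself
-- after at most maxlen+1 passes, so fuel maxlen+2 is never exhausted)
def gaLoop (alias_len : Int) (words : List (List Char)) :
    Nat → List (List Char) → Int → Bool → Nat → List (List Char)
  | 0, heads, _, _, _ => heads
  | fuel + 1, heads, cal, ooc, idx =>
    if cal < alias_len ∧ ooc = false then
      let r := gaInner idx heads words cal true
      gaLoop alias_len words fuel r.1 r.2.1 r.2.2 (idx + 1)
    else heads

def gaMaxLen (words : List (List Char)) : Nat :=
  words.foldl (fun m w => max m w.length) 0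

def generate_alias (command : String) (alias_len : Int) : String :=
  String.ofList (gaLoop alias_len (gaWords command) (gaMaxLen (gaWords command) + 2)
    ((gaWords command).map (fun _ => [])) 0 false 0).flatten  -- "".join(word_heads)

-- ===== PORT B =====
-- while total < alias_len and any(len(w) > cols for w in words): …
def gbLoop (alias_len : Int) (words : List (List Char)) : Nat → Nat → Int → Nat
  | 0, cols, _ => cols
  | fuel + 1, cols, total =>
    if total < alias_len ∧ words.any (fun w => decide (cols < w.length)) then
      gbLoop alias_len words fuel (cols + 1)
        (total + (words.countP (fun w => decide (cols < w.length)) : Int))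
    else cols

def generate_alias_alt (command : String) (alias_len : Int) : String :=
  String.ofList ((gaWords command).map
    (fun w => w.take (gbLoop alias_len (gaWords command) (gaMaxLen (gaWords command) + 1) 0 0))).flatten
  -- "".join(w[:cols] for w in words)

-- ===== PRECONDITION & SPEC =====
def Spec_generate_alias (command : String) (alias_len : Int) (out : String) : Prop := out = generate_alias_alt command alias_len
instance (command : String) (alias_len : Int) (out : String) : Decidable (Spec_generate_alias command alias_len out) := by unfold Spec_generate_alias; infer_instance

-- ===== CLAIM (what is proved, stated in full; the proofs are below) =====
def Claim_equal_generate_alias : Prop := ∀ (command : String) (alias_len : Int), Dom_generate_alias command alias_len → Spec_generate_alias command alias_len (generate_alias command alias_len)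

-- ===== LEMMAS AND PROOFS =====

-- one inner pass, started from heads = the first idx columns of each word, appends
-- column idx: heads become the first idx+1 columns, the count of words reaching
-- column idx is added, and out_of_characters ends false iff some word reached it
theorem gaInner_spec (idx : Nat) (ws : List (List Char)) (cal : Int) (ooc : Bool) :
    gaInner idx (ws.map (fun w => w.take idx)) ws cal ooc =
      (ws.map (fun w => w.take (idx + 1)),
       cal + (ws.countP (fun w => decide (idx < w.length)) : Int),
       ooc && !(ws.any (fun w => decide (idx < w.length)))) := by
  induction ws generalizing cal ooc with
  | nil => simp [gaInner]
  | cons w ws ih =>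
    by_cases h : idx < w.length
    · rw [List.map_cons, gaInner, dif_pos h, ih]
      simp only [List.countP_cons, List.any_cons, h, decide_true, Bool.true_or,
        Bool.not_true, Bool.and_false, Prod.mk.injEq, List.cons.injEq, List.map_cons]
      refine ⟨⟨?_, trivial⟩, by push_cast; ring, by simp⟩
      rw [List.take_add_one]
      simp [List.getElem?_eq_getElem h, List.get_eq_getElem]
    · have hle : w.length ≤ idx := Nat.le_of_not_lt h
      rw [List.map_cons, gaInner, dif_neg h, ih]
      simp only [List.countP_cons, List.any_cons, h, decide_false, Bool.false_or,
        Prod.mk.injEq, List.cons.injEq, List.map_cons]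
      refine ⟨⟨?_, trivial⟩, by simp, by simp⟩
      rw [List.take_of_length_le hle, List.take_of_length_le (Nat.le_succ_of_le hle)]

theorem gaLoop_ooc_true (alias_len : Int) (ws : List (List Char)) (fuel : Nat)
    (heads : List (List Char)) (cal : Int) (idx : Nat) :
    gaLoop alias_len ws fuel heads cal true idx = heads := by
  cases fuel <;> simp [gaLoop]

theorem foldl_max_mono (ws : List (List Char)) :
    ∀ a b : Nat, a ≤ b →
      ws.foldl (fun m w => max m w.length) a ≤ ws.foldl (fun m w => max m w.length) b := by
  induction ws with
  | nil => intro a b h; simpa using h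
  | cons v vs ih =>
    intro a b h
    simp only [List.foldl_cons]
    exact ih _ _ (max_le_max h (le_refl _))

theorem foldl_max_ge (ws : List (List Char)) :
    ∀ init : Nat, init ≤ ws.foldl (fun m w => max m w.length) init := by
  induction ws with
  | nil => simp
  | cons v vs ih =>
    intro init
    simp only [List.foldl_cons]
    exact le_trans (Nat.le_max_left _ _) (ih _)

-- a word's length is bounded by the foldl-max
theorem gaMaxLen_bound (ws : List (List Char)) : ∀ w ∈ ws, w.length ≤ gaMaxLen ws := by
  unfold gaMaxLen
  induction ws with
  | nil => intro w hw; cases hw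
  | cons v vs ih =>
    intro w hw
    simp only [List.foldl_cons]
    rcases List.mem_cons.mp hw with h1 | h1
    · rw [h1]
      exact le_trans (Nat.le_max_right 0 _) (foldl_max_ge vs _)
    · exact le_trans (ih w h1) (foldl_max_mono vs _ _ (Nat.zero_le _))

-- heads stop changing once every word is shorter than the column index
theorem map_take_stable (ws : List (List Char)) (C : Nat)
    (h : ∀ w ∈ ws, w.length ≤ C) :
    ws.map (fun w => w.take (C + 1)) = ws.map (fun w => w.take C) := by
  apply List.map_congr_left
  intro w hw
  rw [List.take_of_length_le (h w hw), List.take_of_length_le (Nat.le_succ_of_le (h w hw))]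

-- both loops, run from column C with matching state, produce the same heads
theorem loops_eq (alias_len : Int) (ws : List (List Char)) :
    ∀ (fuel C : Nat) (total : Int), (∀ w ∈ ws, w.length ≤ C + fuel) →
      gaLoop alias_len ws (fuel + 1) (ws.map (fun w => w.take C)) total false C =
        ws.map (fun w => w.take (gbLoop alias_len ws fuel C total)) := by
  intro fuel
  induction fuel with
  | zero =>
    intro C total hb
    have hb' : ∀ w ∈ ws, w.length ≤ C := by
      intro w hw; have := hb w hw; omega
    have hany : ws.any (fun w => decide (C < w.length)) = false := by
      simp only [List.any_eq_false]
      intro w hw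
      simpa using hb' w hw
    by_cases hc : total < alias_len
    · rw [show gaLoop alias_len ws (0 + 1) (ws.map (fun w => w.take C)) total false C =
          (if total < alias_len ∧ false = false then
            let r := gaInner C (ws.map (fun w => w.take C)) ws total true
            gaLoop alias_len ws 0 r.1 r.2.1 r.2.2 (C + 1)
          else ws.map (fun w => w.take C)) from rfl,
        if_pos ⟨hc, rfl⟩, gaInner_spec]
      simp only [gaLoop, gbLoop]
      exact map_take_stable ws C hb'
    · rw [show gbLoop alias_len ws 0 C total = C from rfl]
      rw [show gaLoop alias_len ws (0 + 1) (ws.map (fun w => w.take C)) total false C =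
          (if total < alias_len ∧ false = false then
            let r := gaInner C (ws.map (fun w => w.take C)) ws total true
            gaLoop alias_len ws 0 r.1 r.2.1 r.2.2 (C + 1)
          else ws.map (fun w => w.take C)) from rfl,
        if_neg (by tauto)]
  | succ fuel ih =>
    intro C total hb
    rw [show gaLoop alias_len ws (fuel + 1 + 1) (ws.map (fun w => w.take C)) total false C =
        (if total < alias_len ∧ false = false then
          let r := gaInner C (ws.map (fun w => w.take C)) ws total true
          gaLoop alias_len ws (fuel + 1) r.1 r.2.1 r.2.2 (C + 1)
        else ws.map (fun w => w.take C)) from rfl]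
    rw [show gbLoop alias_len ws (fuel + 1) C total =
        (if total < alias_len ∧ ws.any (fun w => decide (C < w.length)) then
          gbLoop alias_len ws fuel (C + 1)
            (total + (ws.countP (fun w => decide (C < w.length)) : Int))
        else C) from rfl]
    by_cases hc : total < alias_len
    · by_cases hany : ws.any (fun w => decide (C < w.length)) = true
      · rw [if_pos ⟨hc, rfl⟩, if_pos ⟨hc, hany⟩, gaInner_spec]
        simp only [hany, Bool.not_true, Bool.and_false]
        exact ih (C + 1) _ (fun w hw => by have := hb w hw; omega)
      · simp only [Bool.not_eq_true] at hany
        have hb' : ∀ w ∈ ws, w.length ≤ C := by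
          intro w hw
          have := List.any_eq_false.mp hany w hw
          simpa using this
        rw [if_pos ⟨hc, rfl⟩, if_neg (by simp [hany]), gaInner_spec]
        simp only [hany, Bool.not_false, Bool.and_true, gaLoop_ooc_true]
        exact map_take_stable ws C hb'
    · rw [if_neg (by tauto), if_neg (by tauto)]

-- ===== VERDICT (by name: the statement is the Claim_ definition above) =====
theorem generate_alias_spec : Claim_equal_generate_alias := by
  intro command alias_len _
  unfold Spec_generate_alias generate_alias generate_alias_alt
  have h := loops_eq alias_len (gaWords command) (gaMaxLen (gaWords command) + 1) 0 0
    (fun w hw => by have := gaMaxLen_bound (gaWords command) w hw; omega)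
  simp only [List.take_zero] at h
  rw [show ((gaWords command).map (fun _ => ([] : List Char))) =
      ((gaWords command).map (fun w => ([] : List Char))) from rfl] at *
  rw [show gaMaxLen (gaWords command) + 2 = gaMaxLen (gaWords command) + 1 + 1 from rfl, h]
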